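-- pv_equiv track=rewrite | github.com/BrettRey/erdos-problem-993 | attack2_coeff_scan_2026_02_19.py | choose_canonical_leaf
-- ===== SOURCE A (Python) =====
-- def choose_canonical_leaf(adj: list[list[int]]) -> int | None:
--     """Choose canonical leaf as in prior bridge diagnostics.
--
--     Among all leaves, choose one with minimum support degree; tie by leaf id.
--     For d_leaf <= 1 this minimum should be 2. If it is not 2, return None.
--     """
--     deg = [len(nb) for nb in adj]
--     leaves = [v for v, d in enumerate(deg) if d == 1]
--     if not leaves:
--         return None
--     min_parent_deg = min(deg[adj[l][0]] for l in leaves)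
--     leaf = min(l for l in leaves if deg[adj[l][0]] == min_parent_deg)
--     if deg[adj[leaf][0]] != 2:
--         return None
--     return leaf
-- ===== SOURCE B (Python) =====
-- def choose_canonical_leaf(adj: list[list[int]]) -> int | None:
--     """Single pass: keep the running lexicographic minimum of (parent_degree, leaf_id)."""
--     best = None
--     for v, nb in enumerate(adj):
--         if len(nb) == 1:
--             pd = len(adj[nb[0]])
--             if best is None or (pd, v) < best:
--                 best = (pd, v)
--     if best is None:
--         return None
--     pd, leaf = best
--     return leaf if pd == 2 else None
-- ===== Notes on version B (the rewrite author's own statement) =====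
-- stated objective: simpler
-- what changed: Replaced the precomputed deg list, the leaves list and the two separate min scans by one pass over enumerate(adj) that keeps a running lexicographic minimum of (parent_degree, leaf_id).
import Mathlib
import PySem

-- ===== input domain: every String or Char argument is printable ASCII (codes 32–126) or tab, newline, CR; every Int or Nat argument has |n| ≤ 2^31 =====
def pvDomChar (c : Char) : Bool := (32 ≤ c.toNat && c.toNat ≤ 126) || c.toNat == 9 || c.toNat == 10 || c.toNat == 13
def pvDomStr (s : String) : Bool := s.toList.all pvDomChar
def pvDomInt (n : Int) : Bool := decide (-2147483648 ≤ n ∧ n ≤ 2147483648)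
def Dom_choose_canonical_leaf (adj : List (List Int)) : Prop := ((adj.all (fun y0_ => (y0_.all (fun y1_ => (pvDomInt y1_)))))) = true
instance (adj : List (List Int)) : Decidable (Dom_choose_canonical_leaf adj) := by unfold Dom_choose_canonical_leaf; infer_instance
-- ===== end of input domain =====

-- B replaces A's precomputed deg/leaves lists and its two separate min scans by one pass over
-- enumerate(adj) keeping a running lexicographic minimum of (parent_degree, leaf_id) (objective: simpler).


-- ===== PORT A =====
-- deg = [len(nb) for nb in adj]
def pvDegA (adj : List (List Int)) : List Int := adj.map (fun nb => (nb.length : Int))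

-- deg[adj[l][0]]; the .getD totalizations only fire outside Pre_ (where Python raises IndexError)
def pvPdA (adj : List (List Int)) (l : Int) : Int :=
  (PySem.List.pyGet? (pvDegA adj) ((PySem.List.pyGet? ((PySem.List.pyGet? adj l).getD []) 0).getD 0)).getD 0

def choose_canonical_leaf (adj : List (List Int)) : Option Int :=
  let leaves : List Int := (PySem.List.enumerate (pvDegA adj)).filterMap
      (fun vd => if vd.2 = 1 then some vd.1 else none)
  if leaves.isEmpty then none
  else
    match PySem.List.min? (leaves.map (fun l => pvPdA adj l)) (fun x => x) with
    | none => none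
    | some m =>
      match PySem.List.min? (leaves.filter (fun l => pvPdA adj l == m)) (fun x => x) with
      | none => none
      | some leaf => if pvPdA adj leaf ≠ 2 then none else some leaf

-- ===== PORT B =====
-- loop body: if len(nb) == 1: pd = len(adj[nb[0]]); best = min(best, (pd, v)) lexicographically
def pvStepB (adj : List (List Int)) (best : Option (Int × Int)) (vnb : Int × List Int) : Option (Int × Int) :=
  if vnb.2.length = 1 then
    let pd : Int := (((PySem.List.pyGet? adj (vnb.2.headD 0)).getD []).length : Int)
    match best with
    | none => some (pd, vnb.1)
    | some b => if pd < b.1 ∨ (pd = b.1 ∧ vnb.1 < b.2) then some (pd, vnb.1) else some b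
  else best

def choose_canonical_leaf_alt (adj : List (List Int)) : Option Int :=
  match (PySem.List.enumerate adj).foldl (pvStepB adj) none with
  | none => none
  | some b => if b.1 = 2 then some b.2 else none

-- ===== PRECONDITION & SPEC =====
-- Pre_ excludes exactly the inputs where Python A raises IndexError: a leaf row whose single
-- neighbour is not a valid (possibly negative) Python index into adj (Python B raises there too).
def Pre_choose_canonical_leaf (adj : List (List Int)) : Prop :=
  ∀ nb ∈ adj, nb.length = 1 → PySem.Raise.InRange adj.length (nb.headD 0)
instance (adj : List (List Int)) : Decidable (Pre_choose_canonical_leaf adj) := by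
  unfold Pre_choose_canonical_leaf; infer_instance

def pvWitness_choose_canonical_leaf : List (List Int) := [[1], [0, 2], [1]]

def Spec_choose_canonical_leaf (adj : List (List Int)) (out : Option Int) : Prop := out = choose_canonical_leaf_alt adj
instance (adj : List (List Int)) (out : Option Int) : Decidable (Spec_choose_canonical_leaf adj out) := by unfold Spec_choose_canonical_leaf; infer_instance

-- ===== CLAIM (what is proved, stated in full; the proofs are below) =====
def Claim_equal_choose_canonical_leaf : Prop := ∀ (adj : List (List Int)), Dom_choose_canonical_leaf adj → Pre_choose_canonical_leaf adj → Spec_choose_canonical_leaf adj (choose_canonical_leaf adj)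

-- ===== LEMMAS AND PROOFS =====

theorem pvPyGet?_map {A B : Type} (f : A → B) (xs : List A) (i : Int) :
    PySem.List.pyGet? (xs.map f) i = (PySem.List.pyGet? xs i).map f := by
  simp only [PySem.List.pyGet?, List.length_map]
  cases PySem.List.pyIdx? xs.length i <;> simp

-- pd as a function of the leaf id (A) agrees with pd as computed by B from the row itself
theorem pvPd_link (adj : List (List Int)) (k : Nat) (h : k < adj.length) :
    pvPdA adj (k : Int) = (((PySem.List.pyGet? adj (adj[k].headD 0)).getD []).length : Int) := by
  unfold pvPdA pvDegA
  rw [pvPyGet?_map]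
  have h1 : PySem.List.pyGet? adj (k : Int) = some adj[k] := by
    rw [PySem.List.pyGet?_natCast]; exact List.getElem?_eq_getElem h
  rw [h1]
  have h2 : (PySem.List.pyGet? adj[k] 0).getD 0 = adj[k].headD 0 := by
    cases hnb : adj[k] <;> simp [PySem.List.pyGet?_zero]
  simp only [Option.getD_some, h2]
  cases hp : PySem.List.pyGet? adj (adj[k].headD 0) <;> simp

-- B's loop body on a leaf id, with pd expressed through the id's key
def pvStep2 (key : Int → Int) (b : Option (Int × Int)) (v : Int) : Option (Int × Int) :=
  match b with
  | none => some (key v, v)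
  | some b => if key v < b.1 ∨ (key v = b.1 ∧ v < b.2) then some (key v, v) else some b

-- the fold keeps the lexicographic minimum of (key v, v) over everything seen so far
theorem pvFold_spec (key : Int → Int) (L : List Int) (b : Int × Int) :
    ∃ r, L.foldl (pvStep2 key) (some b) = some r ∧
      (r = b ∨ ∃ v ∈ L, r = (key v, v)) ∧
      (r.1 < b.1 ∨ (r.1 = b.1 ∧ r.2 ≤ b.2)) ∧
      (∀ v ∈ L, r.1 < key v ∨ (r.1 = key v ∧ r.2 ≤ v)) := by
  induction L generalizing b with
  | nil => exact ⟨b, rfl, Or.inl rfl, Or.inr ⟨rfl, le_refl _⟩, by simp⟩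
  | cons x t ih =>
    simp only [List.foldl_cons]
    by_cases hc : key x < b.1 ∨ (key x = b.1 ∧ x < b.2)
    · obtain ⟨r, hr, hmem, hle, hall⟩ := ih (key x, x)
      refine ⟨r, by simpa [pvStep2, hc] using hr, ?_, ?_, ?_⟩
      · rcases hmem with h | ⟨v, hv, h⟩
        · exact Or.inr ⟨x, by simp, h⟩
        · exact Or.inr ⟨v, by simp [hv], h⟩
      · rcases hle with h | ⟨h1, h2⟩ <;> rcases hc with h' | ⟨h1', h2'⟩ <;>
          simp_all <;> omega
      · intro v hv
        rcases List.mem_cons.mp hv with h | h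
        · subst h; simpa using hle
        · exact hall v h
    · obtain ⟨r, hr, hmem, hle, hall⟩ := ih b
      refine ⟨r, by simpa [pvStep2, hc] using hr, ?_, hle, ?_⟩
      · rcases hmem with h | ⟨v, hv, h⟩
        · exact Or.inl h
        · exact Or.inr ⟨v, List.mem_cons_of_mem _ hv, h⟩
      intro v hv
      rcases List.mem_cons.mp hv with h | h
      · subst h
        push Not at hc
        rcases hle with h' | ⟨h1, h2⟩
        · left; omega
        · by_cases hx : r.1 = key v
          · right; exact ⟨hx, by omega⟩
          · left; omega
      · exact hall v h

theorem pvEnumerate_map {A B : Type} (f : A → B) (xs : List A) (s : Int) :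
    PySem.List.enumerate (xs.map f) s
      = (PySem.List.enumerate xs s).map (fun p => (p.1, f p.2)) := by
  induction xs generalizing s with
  | nil => simp [PySem.List.enumerate_nil]
  | cons x t ih => simp [PySem.List.enumerate_cons, ih]

-- A's leaves list, phrased over enumerate(adj) directly
theorem pvLeaves_eq (adj : List (List Int)) :
    (PySem.List.enumerate (pvDegA adj)).filterMap (fun vd => if vd.2 = 1 then some vd.1 else none)
      = (PySem.List.enumerate adj).filterMap (fun p => if p.2.length = 1 then some p.1 else none) := by
  rw [pvDegA, pvEnumerate_map, List.filterMap_map]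
  congr 1; funext p
  simp [Nat.cast_eq_one]

theorem pvFold_B_gen (adj : List (List Int)) (L : List (Int × List Int))
    (HL : ∀ p ∈ L, ∃ (k : Nat) (h : k < adj.length), p = ((k : Int), adj[k])) (b0 : Option (Int × Int)) :
    L.foldl (pvStepB adj) b0
      = (L.filterMap (fun p => if p.2.length = 1 then some p.1 else none)).foldl (pvStep2 (pvPdA adj)) b0 := by
  induction L generalizing b0 with
  | nil => rfl
  | cons p t ih =>
    obtain ⟨k, hk, hp⟩ := HL p (by simp)
    have ht : ∀ q ∈ t, ∃ (k : Nat) (h : k < adj.length), q = ((k : Int), adj[k]) :=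
      fun q hq => HL q (List.mem_cons_of_mem _ hq)
    by_cases hc : p.2.length = 1
    · have hpd : (((PySem.List.pyGet? adj (p.2.headD 0)).getD []).length : Int) = pvPdA adj p.1 := by
        subst hp; exact (pvPd_link adj k hk).symm
      have hstep : pvStepB adj b0 p = pvStep2 (pvPdA adj) b0 p.1 := by
        simp only [pvStepB, pvStep2, hc, if_true, hpd]
      simp only [List.foldl_cons, List.filterMap_cons, hc, if_true, hstep, ih ht]
    · have hstep : pvStepB adj b0 p = b0 := by simp [pvStepB, hc]
      simp only [List.foldl_cons, List.filterMap_cons, hc, if_false, hstep]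
      exact ih ht b0

theorem pvFold_B_eq (adj : List (List Int)) :
    (PySem.List.enumerate adj).foldl (pvStepB adj) none
      = ((PySem.List.enumerate adj).filterMap (fun p => if p.2.length = 1 then some p.1 else none)).foldl
          (pvStep2 (pvPdA adj)) none := by
  apply pvFold_B_gen
  intro p hp
  obtain ⟨k, hk, hpe⟩ := (PySem.List.mem_enumerate_iff _ _ _).mp hp
  exact ⟨k, hk, by simpa using hpe⟩

theorem pvMain (adj : List (List Int)) :
    choose_canonical_leaf adj = choose_canonical_leaf_alt adj := by
  simp only [choose_canonical_leaf, choose_canonical_leaf_alt, pvLeaves_eq, pvFold_B_eq]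
  cases hL : (PySem.List.enumerate adj).filterMap (fun p => if p.2.length = 1 then some p.1 else none) with
  | nil => simp
  | cons x t =>
    set key := pvPdA adj with hkeydef
    have hfold : (x :: t).foldl (pvStep2 key) none = t.foldl (pvStep2 key) (some (key x, x)) := by
      simp [pvStep2]
    obtain ⟨r, hr, hmem, hle, hall⟩ := pvFold_spec key t (key x, x)
    have hall' : ∀ v ∈ x :: t, r.1 < key v ∨ (r.1 = key v ∧ r.2 ≤ v) := by
      intro v hv
      rcases List.mem_cons.mp hv with h | h
      · subst h; exact hle
      · exact hall v h
    have hmem' : ∃ v ∈ x :: t, r = (key v, v) := by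
      rcases hmem with h | ⟨v, hv, h⟩
      · exact ⟨x, by simp, h⟩
      · exact ⟨v, List.mem_cons_of_mem _ hv, h⟩
    obtain ⟨vr, hvr, hreq⟩ := hmem'
    have hr1 : r.1 = key vr := by rw [hreq]
    have hr2 : r.2 = vr := by rw [hreq]
    cases hm : PySem.List.min? ((x :: t).map (fun l => key l)) (fun y => y) with
    | none => exact absurd ((PySem.List.min?_eq_none_iff _ _).mp hm) (by simp)
    | some m =>
      obtain ⟨v0, hv0, hv0e⟩ := List.mem_map.mp (PySem.List.min?_mem hm)
      have hmmin : ∀ y ∈ (x :: t).map (fun l => key l), m ≤ y := PySem.List.min?_isMin hm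
      have h1 : m ≤ r.1 := hmmin r.1 (List.mem_map.mpr ⟨vr, hvr, hr1.symm⟩)
      have h2 : r.1 ≤ m := by
        rcases hall' v0 hv0 with h | ⟨h, _⟩ <;> omega
      have hm_eq : m = r.1 := le_antisymm h1 h2
      have hvrF : vr ∈ (x :: t).filter (fun l => key l == m) :=
        List.mem_filter.mpr ⟨hvr, by simp [← hr1, hm_eq]⟩
      cases hf : PySem.List.min? ((x :: t).filter (fun l => key l == m)) (fun y => y) with
      | none =>
        rw [(PySem.List.min?_eq_none_iff _ _).mp hf] at hvrF
        exact absurd hvrF (List.not_mem_nil)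
      | some leaf =>
        have hlfF := PySem.List.min?_mem hf
        obtain ⟨hlf, hlcond⟩ := List.mem_filter.mp hlfF
        have hkl : key leaf = m := by simpa using hlcond
        have hle1 : leaf ≤ vr := PySem.List.min?_isMin hf vr hvrF
        have hle2 : r.2 ≤ leaf := by
          rcases hall' leaf hlf with h | ⟨_, h⟩ <;> omega
        have hleaf : leaf = r.2 := le_antisymm (hr2 ▸ hle1) hle2
        have hklr : key leaf = r.1 := by omega
        rw [hfold, hr]
        simp only [hf]
        rw [hklr, hleaf]
        by_cases h2c : r.1 = 2 <;> simp [h2c]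

-- ===== VERDICT (by name: the statement is the Claim_ definition above) =====
theorem choose_canonical_leaf_spec : Claim_equal_choose_canonical_leaf := by
  intro adj _ _
  unfold Spec_choose_canonical_leaf
  exact pvMain adj
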